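-- pv_equiv track=rewrite | github.com/IlTACK-OH/Practice_Coding_Test | 프로그래머스/lv1/64061. 크레인 인형뽑기 게임/크레인 인형뽑기 게임.py | solution
-- ===== SOURCE A (Python) =====
-- def solution(board, moves):
--     len_col = len(board[0])
--     new_board = []
--     catch_list = [0]
--     score = 0
--     """
--     함수를 뒤집어서 [0] 인덱스에는 1번에 담긴 정보 리스트가
--     오도록 만들어주는 영역입니다.
--     """
--     for _ in range(len_col):
--         new_board.append([])
--
--     for i in board:
--         num_row = 0
--         for j in i:
--             if j:
--                 new_board[num_row].append(j)
--             num_row += 1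
--     for i in range(len_col):
--         new_board[i].reverse()
--
--     # --------------------------------------
--     for i in moves:
--         if new_board[i-1]:
--             catch = new_board[i-1].pop()
--             if catch_list[-1] == catch:
--                 score += 2
--                 catch_list.pop()
--             else:
--                 catch_list.append(catch)
--
--     return score
-- ===== SOURCE B (Python) =====
-- def solution(board, moves):
--     n = len(board)
--     pointers = [0] * len(board[0])
--     basket = []
--     score = 0
--     for m in moves:
--         c = m - 1
--         r = pointers[c]
--         while r < n and board[r][c] == 0:
--             r += 1
--         if r < n:
--             doll = board[r][c]
--             pointers[c] = r + 1
--             if basket and basket[-1] == doll: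
--                 basket.pop()
--                 score += 2
--             else:
--                 basket.append(doll)
--         else:
--             pointers[c] = r
--     return score
-- ===== Notes on version B (the rewrite author's own statement) =====
-- stated objective: simpler
-- what changed: B drops A's whole transpose-and-reverse preprocessing (building per-column stacks) and instead scans the original board lazily with one per-column row pointer, reading each column top-down on demand; the basket also starts empty instead of carrying A's 0 sentinel.
-- outside the precondition, e.g. on solution([[1, 2], [3]], [2]): A returns 0, B returns 0; on solution([[0], []], [1]): A returns 0, B raises IndexError
import Mathlib
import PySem

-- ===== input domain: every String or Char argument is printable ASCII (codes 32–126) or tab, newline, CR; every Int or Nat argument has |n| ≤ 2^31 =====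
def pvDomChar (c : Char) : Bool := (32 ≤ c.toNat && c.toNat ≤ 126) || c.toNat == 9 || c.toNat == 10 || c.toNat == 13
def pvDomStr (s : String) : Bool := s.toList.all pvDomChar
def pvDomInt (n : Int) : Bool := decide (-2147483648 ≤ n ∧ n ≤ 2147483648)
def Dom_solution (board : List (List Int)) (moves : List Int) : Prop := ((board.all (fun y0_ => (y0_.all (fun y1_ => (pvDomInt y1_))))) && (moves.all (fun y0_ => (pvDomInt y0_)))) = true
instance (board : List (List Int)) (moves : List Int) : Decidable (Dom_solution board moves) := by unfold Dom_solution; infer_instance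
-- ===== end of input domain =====

-- B drops A's whole transpose+reverse preprocessing: it keeps the original board and scans each
-- column lazily with a per-column row pointer (objective: simpler; neither implementation
-- mutates its arguments).

-- ===== PORT A =====
-- new_board[num_row].append(j)  (exact when num_row is in range; Pre_ guarantees it)
def pvAppendAt (nb : List (List Int)) (i : Int) (j : Int) : List (List Int) :=
  PySem.List.pySetD nb i (PySem.List.pyGetD nb i [] ++ [j])

-- inner loop: num_row = 0; for j in i: if j: new_board[num_row].append(j); num_row += 1
def pvBuildRow (nb : List (List Int)) (row : List Int) : List (List Int) :=
  (PySem.List.enumerate row 0).foldl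
    (fun nb p => if p.2 ≠ 0 then pvAppendAt nb p.1 p.2 else nb) nb

-- one iteration of A's moves loop over the state (new_board, catch_list, score)
def pvStepA (st : List (List Int) × List Int × Int) (m : Int) :
    List (List Int) × List Int × Int :=
  let (nb, cl, sc) := st
  match PySem.List.pyGet? nb (m - 1) with
  | none => st            -- IndexError in Python; excluded by Pre_
  | some stack =>
    match stack.getLast? with
    | none => st          -- 'if new_board[i-1]:' is false
    | some c =>           -- catch = new_board[i-1].pop()
      let nb' := PySem.List.pySetD nb (m - 1) stack.dropLast
      if PySem.List.pyGetD cl (-1) 0 = c then (nb', cl.dropLast, sc + 2)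
      else (nb', cl ++ [c], sc)

def solution (board : List (List Int)) (moves : List Int) : Int :=
  let len_col := board.headI.length     -- len(board[0]); board ≠ [] under Pre_
  let nb0 : List (List Int) := List.replicate len_col []
  let nb1 := board.foldl pvBuildRow nb0
  let nb2 := (PySem.List.pyRange 0 (len_col : Int) 1).foldl
      (fun nb i => PySem.List.pySetD nb i ((PySem.List.pyGetD nb i []).reverse)) nb1
  (moves.foldl pvStepA (nb2, ([0] : List Int), (0 : Int))).2.2

-- ===== PORT B =====
-- board[r][c] as Python evaluates it (negative c counts from the end of the row)
def pvCell (board : List (List Int)) (r c : Int) : Option Int :=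
  (PySem.List.pyGet? board r).bind fun row => PySem.List.pyGet? row c

-- while r < n and board[r][c] == 0: r += 1   (fuel ≥ n - r makes the recursion structural)
def pvAdvance (board : List (List Int)) (n c : Int) : Int → Nat → Int
  | r, 0 => r
  | r, fuel + 1 =>
    if r < n ∧ pvCell board r c = some 0 then pvAdvance board n c (r + 1) fuel else r

-- one iteration of B's loop over the state (pointers, basket, score)
def pvStepB (board : List (List Int)) (n : Int) (st : List Int × List Int × Int) (m : Int) :
    List Int × List Int × Int :=
  let (ptrs, bk, sc) := st
  let c := m - 1
  match PySem.List.pyGet? ptrs c with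
  | none => st            -- IndexError in Python; excluded by Pre_
  | some r0 =>
    let r := pvAdvance board n c r0 n.toNat
    if r < n then
      match pvCell board r c with
      | none => st        -- IndexError in Python; excluded by Pre_
      | some doll =>
        let ptrs' := PySem.List.pySetD ptrs c (r + 1)
        if bk ≠ [] ∧ PySem.List.pyGetD bk (-1) 0 = doll then (ptrs', bk.dropLast, sc + 2)
        else (ptrs', bk ++ [doll], sc)
    else (PySem.List.pySetD ptrs c r, bk, sc)

def solution_alt (board : List (List Int)) (moves : List Int) : Int :=
  let n : Int := board.length
  let ptrs0 : List Int := List.replicate board.headI.length 0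
  (moves.foldl (pvStepB board n) (ptrs0, ([] : List Int), (0 : Int))).2.2

-- ===== PRECONDITION & SPEC =====
-- Pre_ excludes empty and non-rectangular boards (B's direct column indexing can raise
-- IndexError on ragged rows that A tolerates) and moves outside [1-width, width]
-- (on which A raises IndexError).
def Pre_solution (board : List (List Int)) (moves : List Int) : Prop :=
  board ≠ [] ∧ (∀ row ∈ board, row.length = board.headI.length) ∧
    ∀ m ∈ moves, 1 - (board.headI.length : Int) ≤ m ∧ m ≤ (board.headI.length : Int)
instance (board : List (List Int)) (moves : List Int) : Decidable (Pre_solution board moves) := by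
  unfold Pre_solution; infer_instance

def pvWitness_solution : List (List Int) × List Int :=
  ([[0, 0, 1], [2, 1, 0], [2, 1, 3]], [1, 2, 3, 3, 2, 0])

def Spec_solution (board : List (List Int)) (moves : List Int) (out : Int) : Prop :=
  out = solution_alt board moves
instance (board : List (List Int)) (moves : List Int) (out : Int) :
    Decidable (Spec_solution board moves out) := by unfold Spec_solution; infer_instance

-- ===== CLAIM (what is proved, stated in full; the proofs are below) =====
def Claim_equal_solution : Prop := ∀ (board : List (List Int)) (moves : List Int),
  Dom_solution board moves → Pre_solution board moves →
    Spec_solution board moves (solution board moves)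

-- ===== LEMMAS AND PROOFS =====

-- resolved (natural) index of Python index i into a list of length w
def pvRes (w : Nat) (i : Int) : Nat := if 0 ≤ i then i.toNat else w - (-i).toNat

lemma pvRes_lt (w : Nat) (i : Int) (h1 : -(w : Int) ≤ i) (h2 : i < w) (hw : 0 < w) :
    pvRes w i < w := by
  unfold pvRes; split_ifs <;> omega

lemma pyIdx?_res (w : Nat) (i : Int) (h1 : -(w : Int) ≤ i) (h2 : i < w) :
    PySem.List.pyIdx? w i = some (pvRes w i) := by
  simp only [PySem.List.pyIdx?, pvRes]; split_ifs <;> simp_all <;> omega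

lemma pyGet?_res {α : Type} (xs : List α) (i : Int) (h1 : -(xs.length : Int) ≤ i)
    (h2 : i < xs.length) (d : α) :
    PySem.List.pyGet? xs i = some (xs.getD (pvRes xs.length i) d) := by
  have hw : 0 < xs.length := by omega
  have hk := pvRes_lt xs.length i h1 h2 hw
  simp [PySem.List.pyGet?, pyIdx?_res _ _ h1 h2, List.getD, List.getElem?_eq_getElem hk]

lemma pySetD_res {α : Type} (xs : List α) (i : Int) (v : α) (h1 : -(xs.length : Int) ≤ i)
    (h2 : i < xs.length) :
    PySem.List.pySetD xs i v = xs.set (pvRes xs.length i) v := by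
  simp [PySem.List.pySetD, PySem.List.pySet?, pyIdx?_res _ _ h1 h2]

-- column k of the board, read top to bottom
def pvGetCol (board : List (List Int)) (k : Nat) : List Int :=
  board.map fun row => row.getD k 0

-- reference model: per column, the list of its nonzero dolls top-to-bottom; one step pops a head
def pvStepR (w : Nat) (st : List (List Int) × List Int × Int) (m : Int) :
    List (List Int) × List Int × Int :=
  let (cols, bk, sc) := st
  let k := pvRes w (m - 1)
  match cols.getD k [] with
  | [] => st
  | d :: rest =>
    let cols' := cols.set k rest
    if bk ≠ [] ∧ PySem.List.pyGetD bk (-1) 0 = d then (cols', bk.dropLast, sc + 2)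
    else (cols', bk ++ [d], sc)


-- ----- takeWhile/filter structure of one column suffix -----

lemma pv_tw_le (l : List Int) : (l.takeWhile (fun x => x == 0)).length ≤ l.length := by
  induction l with
  | nil => simp
  | cons a t ih => simp only [List.takeWhile]; split <;> simp <;> omega

lemma pv_tw_full (l : List Int) (h : (l.takeWhile (fun x => x == 0)).length = l.length) :
    l.filter (fun x => x != 0) = [] := by
  induction l with
  | nil => simp
  | cons a t ih =>
    by_cases ha : a = 0
    · subst ha
      simp only [List.takeWhile_cons] at h
      simp at h
      have := ih (by omega)
      simp [this]
    · simp [ha] at h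

lemma pv_tw_lt (l : List Int) (h : (l.takeWhile (fun x => x == 0)).length < l.length) :
    l.getD ((l.takeWhile (fun x => x == 0)).length) 0 ≠ 0 ∧
    l.filter (fun x => x != 0) =
      l.getD ((l.takeWhile (fun x => x == 0)).length) 0 ::
        (l.drop ((l.takeWhile (fun x => x == 0)).length + 1)).filter (fun x => x != 0) := by
  induction l with
  | nil => simp at h
  | cons a t ih =>
    by_cases ha : a = 0
    · subst ha
      simp only [List.takeWhile_cons] at h ⊢
      simp only [show ((0:Int) == 0) = true from rfl, if_pos] at h ⊢
      simp only [List.length_cons] at h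
      obtain ⟨ih1, ih2⟩ := ih (by omega)
      refine ⟨by simpa using ih1, ?_⟩
      simp only [List.length_cons, List.getD_cons_succ, List.drop_succ_cons,
        List.filter_cons]
      simp only [show ((0:Int) != 0) = false from rfl]
      simpa using ih2
    · have hbeq : (a == (0 : Int)) = false := by simp [ha]
      simp only [List.takeWhile_cons, hbeq, List.drop_succ_cons, List.filter_cons]
      refine ⟨ha, ?_⟩
      simp [ha]

-- ----- the advance loop finds the first nonzero entry of the column suffix -----

lemma pv_advance_unfold (board : List (List Int)) (n c r : Int) (fuel : Nat) :
    pvAdvance board n c r (fuel + 1) =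
      if r < n ∧ pvCell board r c = some 0 then pvAdvance board n c (r + 1) fuel else r := rfl

lemma pv_advance_spec (board : List (List Int)) (c : Int) (L : List Int)
    (hL : L.length = board.length)
    (hcell : ∀ r : Nat, r < board.length → pvCell board (r : Int) c = some (L.getD r 0)) :
    ∀ (fuel p : Nat), p ≤ board.length → board.length - p ≤ fuel →
      pvAdvance board (board.length : Int) c (p : Int) fuel =
        ((p + ((L.drop p).takeWhile (fun x => x == 0)).length : Nat) : Int) := by
  intro fuel
  induction fuel with
  | zero =>
    intro p hp hf
    have hpn : p = board.length := by omega
    subst hpn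
    have hdrop : L.drop board.length = [] := by rw [← hL]; exact List.drop_length
    simp [pvAdvance, hdrop]
  | succ fuel ih =>
    intro p hp hf
    rw [pv_advance_unfold]
    by_cases hlt : p < board.length
    · have hdrop : L.drop p = L[p] :: L.drop (p + 1) :=
        List.drop_eq_getElem_cons (by omega)
      have hget : L.getD p 0 = L[p] := List.getD_eq_getElem L 0 (by omega)
      by_cases hz : L[p] = 0
      · have hcond : pvCell board (p : Int) c = some 0 := by rw [hcell p hlt, hget, hz]
        rw [if_pos ⟨by exact_mod_cast hlt, hcond⟩]
        have h1 : ((p : Int) + 1) = ((p + 1 : Nat) : Int) := by push_cast; ring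
        have htw : ((L.drop p).takeWhile (fun x => x == 0)).length =
            ((L.drop (p + 1)).takeWhile (fun x => x == 0)).length + 1 := by
          rw [hdrop]; simp [hz]
        rw [h1, ih (p + 1) (by omega) (by omega), htw]
        norm_cast
        omega
      · have hcond : pvCell board (p : Int) c = some L[p] := by rw [hcell p hlt, hget]
        rw [if_neg (by rintro ⟨-, h2⟩; rw [hcond] at h2; exact hz (by simpa using h2))]
        have htw : ((L.drop p).takeWhile (fun x => x == 0)).length = 0 := by
          rw [hdrop]; simp [hz]
        rw [htw]
        norm_cast
    · have hpn : p = board.length := by omega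
      subst hpn
      rw [if_neg (by rintro ⟨h1, -⟩; exact absurd h1 (by simp))]
      have hdrop : L.drop board.length = [] := by rw [← hL]; exact List.drop_length
      simp [hdrop]

-- ----- characterisation of A's build loops -----

lemma pv_buildRow_aux (row : List Int) : ∀ (s : Nat) (nb : List (List Int)),
    s + row.length ≤ nb.length →
    (((PySem.List.enumerate row (s : Int)).foldl
        (fun nb p => if p.2 ≠ 0 then pvAppendAt nb p.1 p.2 else nb) nb).length = nb.length ∧
     ∀ k : Nat, ((PySem.List.enumerate row (s : Int)).foldl
        (fun nb p => if p.2 ≠ 0 then pvAppendAt nb p.1 p.2 else nb) nb).getD k [] =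
        nb.getD k [] ++
          (if s ≤ k ∧ k - s < row.length ∧ row.getD (k - s) 0 ≠ 0
           then [row.getD (k - s) 0] else [])) := by
  induction row with
  | nil =>
    intro s nb h
    simp [PySem.List.enumerate]
  | cons j row ih =>
    intro s nb h
    have hs : s < nb.length := by simp at h; omega
    rw [PySem.List.enumerate_cons]
    simp only [List.foldl_cons]
    set nb1 := if j ≠ 0 then pvAppendAt nb ((s : Nat) : Int) j else nb with hnb1
    have hnb1' : nb1 = if j ≠ 0 then nb.set s (nb.getD s [] ++ [j]) else nb := by
      rw [hnb1]
      by_cases hj : j = 0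
      · simp [hj]
      · simp only [hj, if_neg, ne_eq, not_false_iff, if_pos]
        simp [pvAppendAt, hj]
    have hlen1 : nb1.length = nb.length := by rw [hnb1']; split <;> simp
    have hget1 : ∀ k : Nat, nb1.getD k [] =
        nb.getD k [] ++ (if k = s ∧ j ≠ 0 then [j] else []) := by
      intro k
      rw [hnb1']
      by_cases hj : j = 0
      · simp [hj]
      · simp only [hj, ne_eq, not_false_iff, if_pos, and_true]
        by_cases hk : k = s
        · subst hk
          simp [List.getD, List.getElem?_set_self', List.getElem?_eq_getElem hs,
            List.getD_eq_getElem nb [] hs]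
        · simp [List.getD, List.getElem?_set_ne (by omega : s ≠ k), hk]
    have hs1 : (s : Int) + 1 = ((s + 1 : Nat) : Int) := by push_cast; ring
    rw [hs1]
    obtain ⟨ihlen, ihget⟩ := ih (s + 1) nb1 (by simp at h ⊢; omega)
    constructor
    · rw [ihlen, hlen1]
    · intro k
      rw [ihget k, hget1 k, List.append_assoc]
      congr 1
      by_cases hk : k = s
      · subst hk
        have h2 : ∀ a : Nat, ¬ (a + 1 ≤ a) := fun a => by omega
        simp [h2]
      · by_cases hk2 : s + 1 ≤ k
        · have e1 : k - s = (k - (s + 1)) + 1 := by omega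
          rw [e1]
          simp only [List.getD_cons_succ, List.length_cons, hk, false_and, if_false,
            List.nil_append]
          exact if_congr
            ⟨fun ⟨a, b, c⟩ => ⟨by omega, by omega, c⟩,
             fun ⟨a, b, c⟩ => ⟨by omega, by omega, c⟩⟩ rfl rfl
        · have h3 : ¬ (s ≤ k) := by omega
          simp [h3, hk2, hk]

lemma pv_buildAll (rows : List (List Int)) : ∀ (nb : List (List Int)),
    (∀ row ∈ rows, row.length = nb.length) →
    ((rows.foldl pvBuildRow nb).length = nb.length ∧
     ∀ k : Nat, k < nb.length → (rows.foldl pvBuildRow nb).getD k [] =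
       nb.getD k [] ++ (rows.map (fun row => row.getD k 0)).filter (fun x => x != 0)) := by
  induction rows with
  | nil => intro nb h; simp
  | cons row rows ih =>
    intro nb h
    have hrl : row.length = nb.length := h row (by simp)
    obtain ⟨hlen1, hget1⟩ := pv_buildRow_aux row 0 nb (by omega)
    simp only [Nat.cast_zero] at hlen1 hget1
    have hlen1' : (pvBuildRow nb row).length = nb.length := by unfold pvBuildRow; exact hlen1
    have hget1' : ∀ k : Nat, (pvBuildRow nb row).getD k [] =
        nb.getD k [] ++
          (if 0 ≤ k ∧ k - 0 < row.length ∧ row.getD (k - 0) 0 ≠ 0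
           then [row.getD (k - 0) 0] else []) := by unfold pvBuildRow; exact hget1
    have hfold1 : (List.foldl pvBuildRow nb (row :: rows)) =
        List.foldl pvBuildRow (pvBuildRow nb row) rows := by simp
    obtain ⟨ihlen, ihget⟩ := ih (pvBuildRow nb row)
      (by intro r hr; rw [hlen1']; exact h r (by simp [hr]))
    rw [hlen1'] at ihlen ihget
    refine ⟨by rw [hfold1, ihlen], ?_⟩
    intro k hk
    rw [hfold1, ihget k (by omega), hget1' k]
    simp only [List.map_cons, List.filter_cons]
    by_cases hz : row[k]?.getD 0 = 0
    · simp [hz, List.append_assoc]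
    · have hcond : (0 ≤ k ∧ k - 0 < row.length ∧ row.getD (k - 0) 0 ≠ 0) := by
        refine ⟨by omega, by omega, by simpa [List.getD_eq_getElem?_getD] using hz⟩
      rw [if_pos hcond]
      simp [hz, List.append_assoc]

-- ----- characterisation of A's reverse loop -----

lemma pv_getD_set {α : Type} (l : List α) (i j : Nat) (v d : α) (h : i < l.length) :
    (l.set i v).getD j d = if j = i then v else l.getD j d := by
  by_cases hj : j = i
  · subst hj; simp [List.getD, List.getElem?_set_self', List.getElem?_eq_getElem h]
  · simp [List.getD, List.getElem?_set_ne (by omega : i ≠ j), hj]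

lemma pv_revLoop (b : Nat) : ∀ (nb : List (List Int)), b ≤ nb.length →
    (((PySem.List.pyRange 0 (b : Int) 1).foldl
        (fun nb i => PySem.List.pySetD nb i ((PySem.List.pyGetD nb i []).reverse)) nb).length
        = nb.length ∧
     ∀ k : Nat, ((PySem.List.pyRange 0 (b : Int) 1).foldl
        (fun nb i => PySem.List.pySetD nb i ((PySem.List.pyGetD nb i []).reverse)) nb).getD k []
        = if k < b then (nb.getD k []).reverse else nb.getD k []) := by
  induction b with
  | zero => intro nb h; simp [PySem.List.pyRange_one_eq_nil]
  | succ b ih =>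
    intro nb h
    have hcast : ((b + 1 : Nat) : Int) = (b : Int) + 1 := by push_cast; ring
    rw [hcast, PySem.List.pyRange_one_succ_right (by positivity), List.foldl_append]
    obtain ⟨ihlen, ihget⟩ := ih nb (by omega)
    set mid := (PySem.List.pyRange 0 (b : Int) 1).foldl
        (fun nb i => PySem.List.pySetD nb i ((PySem.List.pyGetD nb i []).reverse)) nb with hmid
    have hb : b < mid.length := by omega
    have hstep : List.foldl
        (fun nb i => PySem.List.pySetD nb i ((PySem.List.pyGetD nb i []).reverse)) mid
        [(b : Int)] = mid.set b ((mid.getD b []).reverse) := by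
      simp [PySem.List.pyGetD_natCast]
    rw [hstep]
    constructor
    · simp [ihlen]
    · intro k
      by_cases hk : k = b
      · subst hk
        have e : mid.getD k [] = nb.getD k [] := by rw [ihget k]; simp
        rw [pv_getD_set mid k k ((mid.getD k []).reverse) [] hb, if_pos rfl, e,
          if_pos (by omega : k < k + 1)]
      · rw [pv_getD_set mid b k ((mid.getD b []).reverse) [] hb, if_neg hk, ihget k]
        by_cases h1 : k < b
        · rw [if_pos h1, if_pos (by omega : k < b + 1)]
        · rw [if_neg h1, if_neg (by omega : ¬ k < b + 1)]

-- ----- coupling invariants -----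

def pvInvA (w : Nat) (stA stR : List (List Int) × List Int × Int) : Prop :=
  stA.1.length = w ∧ stR.1.length = w ∧
  (∀ k, k < w → stA.1.getD k [] = (stR.1.getD k []).reverse) ∧
  (∀ k, k < w → ∀ x ∈ stR.1.getD k [], x ≠ 0) ∧
  stA.2.1 = 0 :: stR.2.1 ∧ stA.2.2 = stR.2.2

def pvInvB (board : List (List Int)) (stB : List Int × List Int × Int)
    (stR : List (List Int) × List Int × Int) : Prop :=
  stB.1.length = board.headI.length ∧ stR.1.length = board.headI.length ∧
  (∀ k, k < board.headI.length → ∃ p : Nat, stB.1.getD k 0 = (p : Int) ∧ p ≤ board.length ∧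
      stR.1.getD k [] = ((pvGetCol board k).drop p).filter (fun x => x != 0)) ∧
  stB.2.1 = stR.2.1 ∧ stB.2.2 = stR.2.2

lemma pv_w_pos {w : Nat} {m : Int} (hm : 1 - (w : Int) ≤ m ∧ m ≤ (w : Int)) : 0 < w := by
  rcases Nat.eq_zero_or_pos w with h | h
  · exfalso; rw [h] at hm; simp at hm; omega
  · exact h

lemma pv_stepA_inv {w : Nat} {stA stR : List (List Int) × List Int × Int} {m : Int}
    (hm : 1 - (w : Int) ≤ m ∧ m ≤ (w : Int)) (hinv : pvInvA w stA stR) :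
    pvInvA w (pvStepA stA m) (pvStepR w stR m) := by
  obtain ⟨nb, cl, sc⟩ := stA
  obtain ⟨cols, bk, sc2⟩ := stR
  obtain ⟨hlenA, hlenR, hrel, hnz, hcl, hsc⟩ := hinv
  simp only at hlenA hlenR hrel hnz hcl hsc
  subst hcl hsc
  have hw : 0 < w := pv_w_pos hm
  set k := pvRes w (m - 1) with hkdef
  have hk : k < w := pvRes_lt w (m - 1) (by omega) (by omega) hw
  have hgetA : PySem.List.pyGet? nb (m - 1) = some (nb.getD k []) := by
    rw [pyGet?_res nb (m - 1) (by rw [hlenA]; omega) (by rw [hlenA]; exact_mod_cast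
      (by omega : m - 1 < (w : Int))) [], hlenA]
  have hstack : nb.getD k [] = (cols.getD k []).reverse := hrel k hk
  unfold pvInvA
  cases hcols : cols.getD k [] with
  | nil =>
    have hstacknil : nb.getD k [] = [] := by rw [hstack, hcols]; rfl
    simp only [pvStepA, pvStepR, hgetA, hstacknil, ← hkdef, hcols, List.getLast?_nil]
    refine ⟨hlenA, hlenR, hrel, hnz, ?_, ?_⟩ <;> simp
  | cons d rest =>
    have hd0 : d ≠ 0 := hnz k hk d (by rw [hcols]; simp)
    have hstack2 : nb.getD k [] = rest.reverse ++ [d] := by rw [hstack, hcols]; simp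
    have hlast : (nb.getD k []).getLast? = some d := by
      rw [hstack, hcols, List.getLast?_reverse]; simp
    have hdrop : (nb.getD k []).dropLast = rest.reverse := by
      rw [hstack2, List.dropLast_concat]
    have hsetA : PySem.List.pySetD nb (m - 1) ((nb.getD k []).dropLast)
        = nb.set k ((nb.getD k []).dropLast) := by
      rw [pySetD_res nb (m - 1) _ (by rw [hlenA]; omega) (by rw [hlenA]; exact_mod_cast
        (by omega : m - 1 < (w : Int))), hlenA]
    have hcondeq : (PySem.List.pyGetD (0 :: bk) (-1) 0 = d)
        ↔ (bk ≠ [] ∧ PySem.List.pyGetD bk (-1) 0 = d) := by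
      cases bk with
      | nil =>
        have e : PySem.List.pyGetD ((0 : Int) :: []) (-1) 0 = 0 := rfl
        rw [e]
        exact ⟨fun h => absurd h.symm hd0, fun h => absurd rfl h.1⟩
      | cons b bs =>
        have e1 : PySem.List.pyGetD ((0 : Int) :: b :: bs) (-1) 0
            = ((0 : Int) :: b :: bs).getLast (by simp) := by exact PySem.List.pyGetD_neg_one _ _ (by simp)
        have e2 : PySem.List.pyGetD (b :: bs) (-1) 0
            = (b :: bs).getLast (by simp) := by exact PySem.List.pyGetD_neg_one _ _ (by simp)
        rw [e1, e2, List.getLast_cons (by simp : b :: bs ≠ [])]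
        simp
    have hinvrest :
        (nb.set k ((nb.getD k []).dropLast)).length = w ∧ (cols.set k rest).length = w ∧
        (∀ k', k' < w → (nb.set k ((nb.getD k []).dropLast)).getD k' []
            = ((cols.set k rest).getD k' []).reverse) ∧
        (∀ k', k' < w → ∀ x ∈ (cols.set k rest).getD k' [], x ≠ 0) := by
      refine ⟨by simp [hlenA], by simp [hlenR], ?_, ?_⟩
      · intro k' hk'
        rw [pv_getD_set nb k k' ((nb.getD k []).dropLast) [] (by omega),
          pv_getD_set cols k k' rest [] (by omega)]
        by_cases hkk : k' = k
        · rw [if_pos hkk, if_pos hkk]; exact hdrop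
        · rw [if_neg hkk, if_neg hkk]; exact hrel k' hk'
      · intro k' hk' x hx
        rw [pv_getD_set cols k k' rest [] (by omega)] at hx
        by_cases hkk : k' = k
        · rw [if_pos hkk] at hx
          exact hnz k hk x (by rw [hcols]; simp [hx])
        · rw [if_neg hkk] at hx
          exact hnz k' hk' x hx
    obtain ⟨h1, h2, h3, h4⟩ := hinvrest
    simp only [pvStepA, pvStepR, hgetA, ← hkdef, hcols, hlast, hsetA]
    by_cases hc : bk ≠ [] ∧ PySem.List.pyGetD bk (-1) 0 = d
    · rw [if_pos (hcondeq.mpr hc), if_pos hc]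
      exact ⟨h1, h2, h3, h4, by rw [List.dropLast_cons_of_ne_nil hc.1], rfl⟩
    · rw [if_neg (fun h => hc (hcondeq.mp h)), if_neg hc]
      exact ⟨h1, h2, h3, h4, by simp, rfl⟩

lemma pv_getD_drop (L : List Int) (p t : Nat) :
    (L.drop p).getD t 0 = L.getD (p + t) 0 := by
  simp [List.getD_eq_getElem?_getD, List.getElem?_drop]

lemma pv_stepB_inv {board : List (List Int)} {stB : List Int × List Int × Int}
    {stR : List (List Int) × List Int × Int} {m : Int}
    (hrect : ∀ row ∈ board, row.length = board.headI.length)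
    (hm : 1 - (board.headI.length : Int) ≤ m ∧ m ≤ (board.headI.length : Int))
    (hinv : pvInvB board stB stR) :
    pvInvB board (pvStepB board (board.length : Int) stB m)
      (pvStepR board.headI.length stR m) := by
  obtain ⟨ptrs, bk, sc⟩ := stB
  obtain ⟨cols, bk2, sc2⟩ := stR
  obtain ⟨hlenB, hlenR, hptr, hbk, hsc⟩ := hinv
  simp only at hlenB hlenR hptr hbk hsc
  subst hbk hsc
  have hw : 0 < board.headI.length := pv_w_pos hm
  set w := board.headI.length with hwdef
  set k := pvRes w (m - 1) with hkdef
  have hk : k < w := pvRes_lt w (m - 1) (by omega) (by omega) hw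
  obtain ⟨p, hpval, hple, hcolk⟩ := hptr k hk
  set L := pvGetCol board k with hLdef
  have hLlen : L.length = board.length := by simp [hLdef, pvGetCol]
  have hcell : ∀ r : Nat, r < board.length →
      pvCell board (r : Int) (m - 1) = some (L.getD r 0) := by
    intro r hr
    have hrow : board.getD r [] = board[r] := List.getD_eq_getElem board [] hr
    have hrowlen : (board[r]).length = w := hrect board[r] (List.getElem_mem hr)
    have h1 : PySem.List.pyGet? board (r : Int) = some (board.getD r []) := by
      rw [pyGet?_res board (r : Int) (by omega) (by exact_mod_cast hr) []]
      have e : pvRes board.length (r : Int) = r := by simp [pvRes]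
      rw [e]
    have hres2 : pvRes (board[r]).length (m - 1) = k := by rw [hrowlen]
    have h2 : PySem.List.pyGet? (board[r]) (m - 1) = some ((board[r]).getD k 0) := by
      rw [pyGet?_res (board[r]) (m - 1) (by rw [hrowlen]; omega)
        (by rw [hrowlen]; exact_mod_cast (by omega : m - 1 < (w : Int))) 0, hres2]
    have hLr : L.getD r 0 = (board[r]).getD k 0 := by
      rw [List.getD_eq_getElem L 0 (by omega)]
      simp [hLdef, pvGetCol]
    rw [hLr]
    simp only [pvCell, h1, hrow, Option.bind_some]
    exact h2
  have hget : PySem.List.pyGet? ptrs (m - 1) = some ((p : Nat) : Int) := by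
    rw [pyGet?_res ptrs (m - 1) (by rw [hlenB]; omega)
      (by rw [hlenB]; exact_mod_cast (by omega : m - 1 < (w : Int))) 0]
    have hres : pvRes ptrs.length (m - 1) = k := by rw [hlenB]
    rw [hres, hpval]
  have hfuel : ((board.length : Int)).toNat = board.length := Int.toNat_natCast _
  have hadv : pvAdvance board (board.length : Int) (m - 1) ((p : Nat) : Int)
      ((board.length : Int)).toNat
      = ((p + ((L.drop p).takeWhile (fun x => x == 0)).length : Nat) : Int) := by
    rw [hfuel]
    exact pv_advance_spec board (m - 1) L hLlen hcell board.length p hple (by omega)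
  set t := ((L.drop p).takeWhile (fun x => x == 0)).length with htdef
  have hdl : (L.drop p).length = board.length - p := by rw [List.length_drop, hLlen]
  have htle : t ≤ board.length - p := by rw [htdef, ← hdl]; exact pv_tw_le (L.drop p)
  have hsetp : ∀ v : Int, PySem.List.pySetD ptrs (m - 1) v = ptrs.set k v := by
    intro v
    rw [pySetD_res ptrs (m - 1) v (by rw [hlenB]; omega)
      (by rw [hlenB]; exact_mod_cast (by omega : m - 1 < (w : Int)))]
    congr 1
    rw [hlenB]
  unfold pvInvB
  by_cases hqlt : p + t < board.length
  · have htlt : t < (L.drop p).length := by omega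
    obtain ⟨-, hfilt⟩ := pv_tw_lt (L.drop p) (by rw [← htdef]; exact htlt)
    rw [← htdef, pv_getD_drop] at hfilt
    have hdrop2 : (L.drop p).drop (t + 1) = L.drop (p + t + 1) := by
      rw [List.drop_drop]; congr 1 <;> omega
    rw [hdrop2] at hfilt
    have hcols2 : cols.getD k []
        = L.getD (p + t) 0 :: (L.drop (p + t + 1)).filter (fun x => x != 0) :=
      hcolk.trans hfilt
    have hcellq := hcell (p + t) hqlt
    simp only [pvStepB, pvStepR, hget, hadv, hsetp, ← hkdef, hcols2]
    rw [if_pos (by exact_mod_cast hqlt)]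
    simp only [hcellq]
    have hcast1 : ((p + t : Nat) : Int) + 1 = ((p + t + 1 : Nat) : Int) := by push_cast; ring
    by_cases hc : bk ≠ [] ∧ PySem.List.pyGetD bk (-1) 0 = L.getD (p + t) 0
    · rw [if_pos hc, if_pos hc]
      refine ⟨by simp [hlenB, ← hwdef], by simp [hlenR, ← hwdef], ?_, rfl, rfl⟩
      intro k' hk'
      by_cases hkk : k' = k
      · subst hkk
        rw [pv_getD_set ptrs k k _ 0 (by omega), if_pos rfl,
          pv_getD_set cols k k _ [] (by omega), if_pos rfl]
        exact ⟨p + t + 1, hcast1, by omega, rfl⟩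
      · rw [pv_getD_set ptrs k k' _ 0 (by omega), if_neg hkk,
          pv_getD_set cols k k' _ [] (by omega), if_neg hkk]
        exact hptr k' hk'
    · rw [if_neg hc, if_neg hc]
      refine ⟨by simp [hlenB, ← hwdef], by simp [hlenR, ← hwdef], ?_, rfl, rfl⟩
      intro k' hk'
      by_cases hkk : k' = k
      · subst hkk
        rw [pv_getD_set ptrs k k _ 0 (by omega), if_pos rfl,
          pv_getD_set cols k k _ [] (by omega), if_pos rfl]
        exact ⟨p + t + 1, hcast1, by omega, rfl⟩
      · rw [pv_getD_set ptrs k k' _ 0 (by omega), if_neg hkk,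
          pv_getD_set cols k k' _ [] (by omega), if_neg hkk]
        exact hptr k' hk'
  · have hqeq : p + t = board.length := by omega
    have hfull : t = (L.drop p).length := by omega
    have hcolsnil : cols.getD k [] = [] :=
      hcolk.trans (pv_tw_full (L.drop p) (by rw [← htdef, hfull]))
    simp only [pvStepB, pvStepR, hget, hadv, hsetp, ← hkdef, hcolsnil]
    have hnlt' : ¬ ((p + t : Nat) : Int) < (board.length : Int) := by exact_mod_cast hqlt
    rw [if_neg hnlt']
    refine ⟨by simp [hlenB, ← hwdef], hlenR, ?_, rfl, rfl⟩
    intro k' hk'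
    rw [pv_getD_set ptrs k k' _ 0 (by omega)]
    by_cases hkk : k' = k
    · subst hkk
      rw [if_pos rfl]
      refine ⟨p + t, rfl, by omega, ?_⟩
      have hLnil : L.drop board.length = [] := by rw [← hLlen]; exact List.drop_length
      rw [hcolsnil, hqeq, show pvGetCol board k = L from rfl, hLnil]
      rfl
    · rw [if_neg hkk]
      exact hptr k' hk'

lemma pv_foldA (w : Nat) (mvs : List Int)
    (hmv : ∀ m ∈ mvs, 1 - (w : Int) ≤ m ∧ m ≤ (w : Int)) :
    ∀ stA stR, pvInvA w stA stR →
      pvInvA w (mvs.foldl pvStepA stA) (mvs.foldl (pvStepR w) stR) := by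
  induction mvs with
  | nil => intro _ _ h; exact h
  | cons m mvs ih =>
    intro stA stR h
    exact ih (fun m' hm' => hmv m' (by simp [hm'])) _ _ (pv_stepA_inv (hmv m (by simp)) h)

lemma pv_foldB (board : List (List Int))
    (hrect : ∀ row ∈ board, row.length = board.headI.length) (mvs : List Int)
    (hmv : ∀ m ∈ mvs, 1 - (board.headI.length : Int) ≤ m ∧ m ≤ (board.headI.length : Int)) :
    ∀ stB stR, pvInvB board stB stR →
      pvInvB board (mvs.foldl (pvStepB board (board.length : Int)) stB)
        (mvs.foldl (pvStepR board.headI.length) stR) := by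
  induction mvs with
  | nil => intro _ _ h; exact h
  | cons m mvs ih =>
    intro stB stR h
    exact ih (fun m' hm' => hmv m' (by simp [hm'])) _ _
      (pv_stepB_inv hrect (hmv m (by simp)) h)

theorem solution_spec : Claim_equal_solution := by
  intro board moves hdom hpre
  obtain ⟨hne, hrect, hmv⟩ := hpre
  unfold Spec_solution
  set w := board.headI.length with hwdef
  set cols0 : List (List Int) :=
    (List.range w).map (fun k => (pvGetCol board k).filter (fun x => x != 0)) with hc0
  have hc0len : cols0.length = w := by simp [hc0]
  have hc0get : ∀ k, k < w → cols0.getD k [] = (pvGetCol board k).filter (fun x => x != 0) := by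
    intro k hk
    rw [List.getD_eq_getElem cols0 [] (by rw [hc0len]; exact hk)]
    simp [hc0]
  -- A's preprocessing
  obtain ⟨hb1len, hb1get⟩ := pv_buildAll board (List.replicate w ([] : List Int))
    (by intro row hr; simp [hrect row hr])
  set nb1 := board.foldl pvBuildRow (List.replicate w ([] : List Int)) with hnb1
  have hb1len' : nb1.length = w := by rw [hb1len]; simp
  obtain ⟨hb2len, hb2get⟩ := pv_revLoop w nb1 (by omega)
  set nb2 := (PySem.List.pyRange 0 (w : Int) 1).foldl
    (fun nb i => PySem.List.pySetD nb i ((PySem.List.pyGetD nb i []).reverse)) nb1 with hnb2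
  have hb2len' : nb2.length = w := by rw [hb2len]; exact hb1len'
  have hinvA0 : pvInvA w (nb2, ([0] : List Int), (0 : Int)) (cols0, ([] : List Int), (0 : Int)) := by
    refine ⟨hb2len', hc0len, ?_, ?_, rfl, rfl⟩
    · intro k hk
      rw [hb2get k, if_pos hk, hc0get k hk, hb1get k (by simpa using hk)]
      rw [show (List.replicate w ([] : List Int)).getD k [] = [] from by simp,
        List.nil_append]
      rfl
    · intro k hk x hx
      rw [hc0get k hk] at hx
      simpa using (List.mem_filter.mp hx).2
  have hinvB0 : pvInvB board (List.replicate w (0 : Int), ([] : List Int), (0 : Int))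
      (cols0, ([] : List Int), (0 : Int)) := by
    refine ⟨by simp [← hwdef], hc0len, ?_, rfl, rfl⟩
    intro k hk
    refine ⟨0, by simp [List.getD_replicate], by omega, ?_⟩
    rw [hc0get k hk, List.drop_zero]
  have hfinA := pv_foldA w moves hmv _ _ hinvA0
  have hfinB := pv_foldB board hrect moves hmv _ _ hinvB0
  have eA : solution board moves
      = (moves.foldl pvStepA (nb2, ([0] : List Int), (0 : Int))).2.2 := rfl
  have eB : solution_alt board moves
      = (moves.foldl (pvStepB board (board.length : Int))
          (List.replicate w (0 : Int), ([] : List Int), (0 : Int))).2.2 := rfl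
  rw [eA, eB, hfinA.2.2.2.2.2, hfinB.2.2.2.2]
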